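-- pv_equiv track=rewrite | github.com/udonehn/Algorithm | 백준/Silver/1316. 그룹 단어 체커/그룹 단어 체커.py | check
-- ===== SOURCE A (Python) =====
-- def check(word):
--     s=set()
--     c=word[0]
--     s.add(c)
--     for i in word[1:]:
--         if i !=c:
--             if i in s:
--                 return False
--             else:
--                 s.add(i)
--                 c=i
--     return True
-- ===== SOURCE B (Python) =====
-- def check(word):
--     seen = [word[0]]
--     for ch in word[1:]:
--         if ch != seen[-1]:
--             seen.append(ch)
--     return len(seen) == len(set(seen))
-- ===== Notes on version B (the rewrite author's own statement) =====
-- stated objective: simpler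
-- what changed: Instead of A's incremental membership-set with early return, B collapses the word into its run-length block representatives in one pass and then checks uniqueness once by comparing len(seen) with len(set(seen)).
import Mathlib
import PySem

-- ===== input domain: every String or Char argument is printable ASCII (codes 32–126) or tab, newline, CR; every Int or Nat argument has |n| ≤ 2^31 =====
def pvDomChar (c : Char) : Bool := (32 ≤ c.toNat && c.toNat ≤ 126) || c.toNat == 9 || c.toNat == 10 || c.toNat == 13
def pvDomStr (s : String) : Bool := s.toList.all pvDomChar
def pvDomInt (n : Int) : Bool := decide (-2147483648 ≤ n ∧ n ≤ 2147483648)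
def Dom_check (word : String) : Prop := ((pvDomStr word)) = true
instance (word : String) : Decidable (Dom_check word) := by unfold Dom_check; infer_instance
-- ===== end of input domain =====

-- B collapses the word into its run-block representatives in one pass, then checks uniqueness
-- once at the end (len(seen) == len(set(seen))) — simpler decomposition, same O(n) cost.

-- ===== PORT A =====
-- the for-loop of A over word[1:] with state (s, c); early 'return False' = result false
def checkLoop (l : List Char) (s : PySem.Set Char) (c : Char) : Bool :=
  match l with
  | [] => true
  | i :: rest =>
    if i ≠ c then
      if PySem.Set.contains s i then false
      else checkLoop rest (PySem.Set.add s i) i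
    else checkLoop rest s c

def check (word : String) : Bool :=
  match word.toList with
  | [] => true    -- Python: word[0] raises IndexError here; excluded by Pre_check
  | c :: rest => checkLoop rest (PySem.Set.add PySem.Set.empty c) c

-- ===== PORT B =====
-- the for-loop of B over word[1:] building 'seen'; seen[-1] ported with pyGet? seen (-1)
-- (exact: seen is always nonempty, so pyGet? returns 'some' of Python's seen[-1])
def collapseLoop (l : List Char) (seen : List Char) : List Char :=
  match l with
  | [] => seen
  | ch :: rest =>
    if some ch ≠ PySem.List.pyGet? seen (-1) then collapseLoop rest (seen ++ [ch])
    else collapseLoop rest seen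

def check_alt (word : String) : Bool :=
  match word.toList with
  | [] => true    -- Python: seen = [word[0]] raises IndexError here; excluded by Pre_check
  | c :: rest =>
    let seen := collapseLoop rest [c]
    decide (seen.length = (PySem.Set.ofList seen).length)

-- ===== PRECONDITION & SPEC =====
-- Pre_ excludes only the empty string, on which both A and B raise IndexError (word[0]).
def Pre_check (word : String) : Prop := word ≠ ""
instance (word : String) : Decidable (Pre_check word) := by unfold Pre_check; infer_instance
def pvWitness_check : String := "aabba"

def Spec_check (word : String) (out : Bool) : Prop := out = check_alt word
instance (word : String) (out : Bool) : Decidable (Spec_check word out) := by unfold Spec_check; infer_instance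

-- ===== CLAIM (what is proved, stated in full; the proofs are below) =====
def Claim_equal_check : Prop := ∀ (word : String), Dom_check word → Pre_check word → Spec_check word (check word)

-- ===== LEMMAS AND PROOFS =====

-- proof-side description of the collapsed block representatives after a block letter c
def collapse (c : Char) : List Char → List Char
  | [] => []
  | i :: rest => if i ≠ c then i :: collapse i rest else collapse c rest

theorem collapseLoop_eq (l : List Char) : ∀ (pref : List Char) (c : Char),
    collapseLoop l (pref ++ [c]) = (pref ++ [c]) ++ collapse c l := by
  induction l with
  | nil => intro pref c; simp [collapseLoop, collapse]
  | cons ch rest ih =>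
    intro pref c
    simp only [collapseLoop, collapse, PySem.List.pyGet?_neg_one_append_singleton]
    by_cases h : ch = c
    · simp [h, ih pref c]
    · have : some ch ≠ some c := by simp [h]
      simp only [this, if_pos, h, ne_eq, not_false_eq_true]
      have := ih (pref ++ [c]) ch
      simpa using this

theorem checkLoop_iff (l : List Char) : ∀ (s : PySem.Set Char) (c : Char),
    s.Nodup → c ∈ s →
    (checkLoop l s c = true ↔ (collapse c l).Nodup ∧ ∀ x ∈ collapse c l, x ∉ s) := by
  induction l with
  | nil => intro s c _ _; simp [checkLoop, collapse]
  | cons i rest ih =>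
    intro s c hnd hc
    by_cases h : i = c
    · simpa [checkLoop, collapse, h] using ih s c hnd hc
    · simp only [checkLoop, collapse, h, ne_eq, not_false_eq_true, if_true]
      by_cases hm : i ∈ s
      · rw [if_pos ((PySem.Set.contains_iff s i).mpr hm)]
        constructor
        · intro hfalse; cases hfalse
        · rintro ⟨-, hall⟩
          exact absurd hm (hall i (by simp))
      · rw [if_neg (by simp only [(PySem.Set.contains_iff s i)]; exact hm)]
        have hadd : PySem.Set.add s i = s ++ [i] := PySem.Set.add_of_not_mem hm
        have hnd' : (PySem.Set.add s i).Nodup := by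
          rw [hadd, List.nodup_append]
          refine ⟨hnd, List.nodup_singleton i, ?_⟩
          intro a ha b hb
          rintro rfl
          have : a = i := by simpa using hb
          exact hm (this ▸ ha)
        have hmem : i ∈ PySem.Set.add s i := by rw [hadd]; simp
        rw [ih _ i hnd' hmem]
        constructor
        · rintro ⟨hnd2, hall⟩
          refine ⟨List.nodup_cons.mpr ⟨?_, hnd2⟩, ?_⟩
          · intro hi
            exact (hall i hi) (by rw [hadd]; simp)
          · intro x hx
            rcases List.mem_cons.mp hx with rfl | hx
            · exact hm
            · intro hxs
              exact hall x hx (by rw [hadd]; exact List.mem_append_left _ hxs)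
        · rintro ⟨hnd2, hall⟩
          obtain ⟨hni, hnd3⟩ := List.nodup_cons.mp hnd2
          refine ⟨hnd3, ?_⟩
          intro x hx hxadd
          rw [hadd] at hxadd
          rcases List.mem_append.mp hxadd with hxs | hxi
          · exact hall x (List.mem_cons_of_mem _ hx) hxs
          · have : x = i := by simpa using hxi
            subst this
            exact hni hx

theorem length_ofList_iff (xs : List Char) :
    xs.length = (PySem.Set.ofList xs).length ↔ xs.Nodup := by
  induction xs using List.reverseRecOn with
  | nil => simp [PySem.Set.ofList_nil]
  | append_singleton xs x ih =>
    rw [PySem.Set.ofList_append_singleton, PySem.Set.add_eq_ite]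
    by_cases hx : x ∈ PySem.Set.ofList xs
    · have hxs : x ∈ xs := (PySem.Set.mem_ofList xs x).mp hx
      have hle := PySem.Set.length_ofList_le (xs := xs)
      rw [if_pos hx]
      constructor
      · intro h; simp only [List.length_append, List.length_singleton] at h; omega
      · intro h
        rw [List.nodup_append] at h
        exact absurd rfl (h.2.2 x hxs x (by simp))
    · rw [if_neg hx]
      have hxs : x ∉ xs := fun h => hx ((PySem.Set.mem_ofList xs x).mpr h)
      simp only [List.length_append, List.length_singleton]
      rw [List.nodup_append]
      constructor
      · intro h
        refine ⟨ih.mp (by omega), List.nodup_singleton x, ?_⟩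
        intro a ha b hb
        rintro rfl
        have : a = x := by simpa using hb
        exact hxs (this ▸ ha)
      · rintro ⟨h1, -, -⟩
        have := ih.mpr h1
        omega

-- ===== VERDICT (by name: the statement is the Claim_ definition above) =====
theorem check_spec : Claim_equal_check := by
  intro word _ hpre
  unfold Spec_check check check_alt
  have hne : word.toList ≠ [] := by
    intro h
    exact hpre (String.toList_eq_nil_iff.mp h)
  match hw : word.toList with
  | [] => exact absurd hw hne
  | c :: rest =>
    show checkLoop rest (PySem.Set.add PySem.Set.empty c) c =
      decide ((collapseLoop rest [c]).length = (PySem.Set.ofList (collapseLoop rest [c])).length)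
    have hseen : collapseLoop rest [c] = c :: collapse c rest := by
      have := collapseLoop_eq rest [] c
      simpa using this
    rw [hseen]
    have hs0 : PySem.Set.add PySem.Set.empty c = [c] := by
      simp [PySem.Set.empty]
    rw [hs0]
    have hiff := checkLoop_iff rest [c] c (by simp) (by simp)
    have hlen := length_ofList_iff (c :: collapse c rest)
    have : (checkLoop rest [c] c = true) ↔
        (decide ((c :: collapse c rest).length = (PySem.Set.ofList (c :: collapse c rest)).length) = true) := by
      rw [hiff, decide_eq_true_iff, hlen, List.nodup_cons]
      constructor
      · rintro ⟨h1, h2⟩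
        exact ⟨fun hc => (h2 c hc) (by simp), h1⟩
      · rintro ⟨h1, h2⟩
        refine ⟨h2, fun x hx hxs => ?_⟩
        have : x = c := by simpa using hxs
        subst this; exact h1 hx
    exact Bool.coe_iff_coe.mp this
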